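-- pv_equiv track=rewrite | github.com/meredithbloom/codewars | python/codewars3.py | choose_best_sum
-- ===== SOURCE A (Python) =====
-- import itertools
--
-- def choose_best_sum(t, k, ls):
--     # all permutations of k length sub-lists of distances
--     # sum of each permutation
--     # highest sum <= t
--     filtered = sorted(filter(lambda x: x <= t, ls))
--     if len(filtered) < k:
--         return None
--     combs = list(itertools.combinations(filtered, k))
--     sums = [sum(x) for x in combs]
--     sums = list(filter(lambda x: x<=t, sums))
--     if len(sums) == 0:
--         return None
--     return max(sums)
-- ===== SOURCE B (Python) =====
-- def choose_best_sum(t, k, ls):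
--     # Bounded-cardinality subset-sum DP: dp[j] = set of sums reachable by
--     # picking exactly j of the admissible elements (those <= t) seen so far.
--     xs = [x for x in ls if x <= t]
--     if k > len(xs):
--         return None
--     dp = [{0}] + [set() for _ in range(k)]
--     for x in xs:
--         for j in range(k - 1, -1, -1):
--             dp[j + 1] |= {s + x for s in dp[j]}
--     cands = [s for s in dp[k] if s <= t]
--     return max(cands) if cands else None
-- ===== Notes on version B (the rewrite author's own statement) =====
-- stated objective: alternative
-- what changed: Replaces A's materialisation of all C(n,k) k-combinations (sort, itertools.combinations, per-combination sums) by a bounded-cardinality subset-sum DP that folds once over the list keeping, for each count j <= k, the set of reachable sums; the maximum reachable sum <= t with exactly k items is read off dp[k].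
import Mathlib
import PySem

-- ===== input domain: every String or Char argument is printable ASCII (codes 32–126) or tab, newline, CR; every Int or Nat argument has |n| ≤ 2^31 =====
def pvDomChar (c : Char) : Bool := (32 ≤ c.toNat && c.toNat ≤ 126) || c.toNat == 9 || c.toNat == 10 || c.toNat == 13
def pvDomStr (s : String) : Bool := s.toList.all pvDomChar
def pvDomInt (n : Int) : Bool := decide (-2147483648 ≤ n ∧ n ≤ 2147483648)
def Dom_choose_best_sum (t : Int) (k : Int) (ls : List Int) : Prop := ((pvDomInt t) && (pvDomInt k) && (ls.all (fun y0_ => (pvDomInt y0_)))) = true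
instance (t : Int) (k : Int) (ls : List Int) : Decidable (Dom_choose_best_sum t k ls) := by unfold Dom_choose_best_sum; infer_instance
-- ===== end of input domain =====

-- B replaces A's enumeration of all C(n,k) k-combinations by a bounded-cardinality
-- subset-sum DP over sets of reachable sums (objective: alternative).

-- ===== PORT A =====
-- helper: itertools.combinations(l, n), in itertools' order
def pvCombsA : Nat → List Int → List (List Int)
  | 0, _ => [[]]
  | _ + 1, [] => []
  | n + 1, x :: xs => (pvCombsA n xs).map (fun c => x :: c) ++ pvCombsA (n + 1) xs

def choose_best_sum (t : Int) (k : Int) (ls : List Int) : Option Int :=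
  let filtered := PySem.List.sorted (ls.filter (fun x => decide (x ≤ t))) (fun x => x) false
  if (filtered.length : Int) < k then none
  else
    -- combinations(filtered, k): Pre_ gives 0 ≤ k (Python raises ValueError for k < 0)
    let sums := (pvCombsA k.toNat filtered).map List.sum
    let sums2 := sums.filter (fun x => decide (x ≤ t))
    if sums2.length = 0 then none
    else PySem.List.max? sums2 (fun x => x)

-- ===== PORT B =====
-- helper: the loop body 'dp[j+1] |= {s + x for s in dp[j]}'
def pvUpdB (x : Int) (dp : List (PySem.Set Int)) (j : Int) : List (PySem.Set Int) :=
  PySem.List.pySetD dp (j + 1)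
    (PySem.Set.union (PySem.List.pyGetD dp (j + 1) [])
      ((PySem.List.pyGetD dp j []).map (fun s => s + x)))

def choose_best_sum_alt (t : Int) (k : Int) (ls : List Int) : Option Int :=
  let xs := ls.filter (fun x => decide (x ≤ t))
  if (xs.length : Int) < k then none   -- if k > len(xs): return None
  else
    -- dp = [{0}] + [set() for _ in range(k)]
    let dp0 : List (PySem.Set Int) :=
      PySem.Set.ofList [0] :: (PySem.List.pyRange 0 k 1).map (fun _ => (PySem.Set.empty : PySem.Set Int))
    -- for x in xs: for j in range(k - 1, -1, -1): dp[j+1] |= {s + x for s in dp[j]}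
    let dp := xs.foldl (fun dp x => (PySem.List.pyRange (k - 1) (-1) (-1)).foldl (pvUpdB x) dp) dp0
    match PySem.List.pyGet? dp k with
    | none => none  -- unreachable under Pre_ (dp has length k+1)
    | some dk =>
      let cands := dk.filter (fun s => decide (s ≤ t))
      if cands.length = 0 then none
      else PySem.List.max? cands (fun x => x)

-- ===== PRECONDITION & SPEC =====
-- Pre_ excludes k < 0, where Python A raises ValueError from itertools.combinations.
def Pre_choose_best_sum (t : Int) (k : Int) (ls : List Int) : Prop := 0 ≤ k
instance (t : Int) (k : Int) (ls : List Int) : Decidable (Pre_choose_best_sum t k ls) := by unfold Pre_choose_best_sum; infer_instance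

def pvWitness_choose_best_sum : Int × Int × List Int := (10, 2, [1, 2, 3])

def Spec_choose_best_sum (t : Int) (k : Int) (ls : List Int) (out : Option Int) : Prop := out = choose_best_sum_alt t k ls
instance (t : Int) (k : Int) (ls : List Int) (out : Option Int) : Decidable (Spec_choose_best_sum t k ls out) := by unfold Spec_choose_best_sum; infer_instance

-- ===== CLAIM (what is proved, stated in full; the proofs are below) =====
def Claim_equal_choose_best_sum : Prop := ∀ (t : Int) (k : Int) (ls : List Int), Dom_choose_best_sum t k ls → Pre_choose_best_sum t k ls → Spec_choose_best_sum t k ls (choose_best_sum t k ls)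

-- ===== LEMMAS AND PROOFS =====

/-- "m is the sum of some n-element sub-multiset of l" — the common semantics of
both candidate collections. -/
def pvSums (n : Nat) (l : List Int) (m : Int) : Prop :=
  ∃ c : List Int, c.Subperm l ∧ c.length = n ∧ c.sum = m

lemma pvCombsA_perm (n : Nat) (l : List Int) :
    (pvCombsA n l).Perm (List.sublistsLen n l) := by
  induction l generalizing n with
  | nil => cases n <;> simp [pvCombsA]
  | cons x xs ih =>
    cases n with
    | zero => simp [pvCombsA]
    | succ n =>
      rw [List.sublistsLen_succ_cons]
      exact (((ih n).map (List.cons x)).append (ih (n+1))).trans List.perm_append_comm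

lemma mem_map_sum_pvCombsA (n : Nat) (l : List Int) (m : Int) :
    m ∈ (pvCombsA n l).map List.sum ↔ pvSums n l m := by
  rw [((pvCombsA_perm n l).map List.sum).mem_iff]
  simp only [List.mem_map, List.mem_sublistsLen]
  constructor
  · rintro ⟨c, ⟨hsub, hlen⟩, hsum⟩
    exact ⟨c, hsub.subperm, hlen, hsum⟩
  · rintro ⟨c, ⟨c', hperm, hsub⟩, hlen, hsum⟩
    exact ⟨c', ⟨hsub, by rw [hperm.length_eq, hlen]⟩, by rw [hperm.sum_eq, hsum]⟩

lemma pvSums_perm {l l' : List Int} (h : l.Perm l') (n : Nat) (m : Int) :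
    pvSums n l m ↔ pvSums n l' m := by
  constructor <;> rintro ⟨c, hc, hlen, hsum⟩
  · exact ⟨c, hc.trans h.subperm, hlen, hsum⟩
  · exact ⟨c, hc.trans h.symm.subperm, hlen, hsum⟩

lemma pvSums_zero (l : List Int) (m : Int) : pvSums 0 l m ↔ m = 0 := by
  constructor
  · rintro ⟨c, _, hlen, hsum⟩
    rw [List.length_eq_zero_iff] at hlen; subst hlen; simp at hsum; omega
  · rintro rfl; exact ⟨[], List.nil_subperm, rfl, rfl⟩

lemma pvSums_succ_nil (n : Nat) (m : Int) : ¬ pvSums (n+1) [] m := by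
  rintro ⟨c, hc, hlen, -⟩
  have := hc.length_le; simp only [List.length_nil] at this; omega

lemma pvCombsA_succ_cons (n : Nat) (x : Int) (xs : List Int) :
    pvCombsA (n+1) (x :: xs) = (pvCombsA n xs).map (fun c => x :: c) ++ pvCombsA (n+1) xs := rfl

lemma pvSums_succ_cons (n : Nat) (x : Int) (l : List Int) (m : Int) :
    pvSums (n+1) (x :: l) m ↔ pvSums (n+1) l m ∨ ∃ s, pvSums n l s ∧ m = s + x := by
  simp only [← mem_map_sum_pvCombsA, pvCombsA_succ_cons, List.map_append, List.mem_append,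
    List.map_map, List.mem_map, Function.comp]
  constructor
  · rintro (⟨c, hc, hs⟩ | h)
    · exact Or.inr ⟨c.sum, ⟨c, hc, rfl⟩, by simp at hs; omega⟩
    · exact Or.inl h
  · rintro (h | ⟨s, ⟨c, hc, rfl⟩, rfl⟩)
    · exact Or.inr h
    · exact Or.inl ⟨c, hc, by simp; omega⟩

-- B-side structural lemmas
/-- simultaneous effect of one pass of B's inner (downward) loop -/
def pvStepB (x : Int) (m : Nat) (dp : List (PySem.Set Int)) : List (PySem.Set Int) :=
  dp.mapIdx (fun i d => if 1 ≤ i ∧ i ≤ m then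
    PySem.Set.union d ((dp.getD (i-1) []).map (fun s => s + x)) else d)

lemma pvStepB_length (x : Int) (m : Nat) (dp : List (PySem.Set Int)) :
    (pvStepB x m dp).length = dp.length := by
  simp [pvStepB]

lemma pvStepB_getD_zero (x : Int) (m : Nat) (dp : List (PySem.Set Int)) :
    (pvStepB x m dp).getD 0 [] = dp.getD 0 [] := by
  cases dp with
  | nil => rfl
  | cons d0 rest =>
    rw [List.getD_eq_getElem _ _ (by simp [pvStepB]), List.getD_eq_getElem _ _ (by simp)]
    simp [pvStepB]

lemma pvStepB_getD_succ (x : Int) (m : Nat) (dp : List (PySem.Set Int)) (i : Nat)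
    (h1 : i + 1 < dp.length) (h2 : i + 1 ≤ m) :
    (pvStepB x m dp).getD (i+1) [] =
      PySem.Set.union (dp.getD (i+1) []) ((dp.getD i []).map (fun s => s + x)) := by
  rw [List.getD_eq_getElem _ _ (hn := by simp [pvStepB]; omega),
    List.getD_eq_getElem dp _ (hn := h1)]
  simp [pvStepB, h2]

lemma pvUpdB_natCast (x : Int) (dp : List (PySem.Set Int)) (m : Nat) :
    pvUpdB x dp (m : Int) = dp.set (m+1)
      (PySem.Set.union (dp.getD (m+1) []) ((dp.getD m []).map (fun s => s + x))) := by
  unfold pvUpdB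
  have h : ((m : Int) + 1) = ((m + 1 : Nat) : Int) := by push_cast; ring
  rw [h, PySem.List.pySetD_natCast, PySem.List.pyGetD_natCast, PySem.List.pyGetD_natCast]

lemma pvInner_spec (x : Int) (m : Nat) (dp : List (PySem.Set Int)) (hm : m < dp.length) :
    (PySem.List.pyRange ((m : Int) - 1) (-1) (-1)).foldl (pvUpdB x) dp = pvStepB x m dp := by
  induction m generalizing dp with
  | zero =>
    rw [PySem.List.pyRange_neg_one_eq_nil (by norm_num), List.foldl_nil]
    apply List.ext_getElem (by simp [pvStepB])
    intro i hi1 hi2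
    simp only [pvStepB, List.getElem_mapIdx]
    rw [if_neg (by omega)]
  | succ m ih =>
    have ha : ((m + 1 : Nat) : Int) - 1 = (m : Int) := by push_cast; ring
    rw [ha, PySem.List.pyRange_neg_one_cons (by omega), List.foldl_cons]
    have hlen' : (pvUpdB x dp (m : Int)).length = dp.length := by
      rw [pvUpdB_natCast]; simp
    have hm' : (m : Int) - 1 = ((m : Nat) : Int) - 1 := by norm_num
    rw [hm', ih _ (by omega)]
    rw [pvUpdB_natCast]
    apply List.ext_getElem (by simp [pvStepB])
    intro i hi1 hi2
    simp only [pvStepB, List.getElem_mapIdx]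
    by_cases hi : 1 ≤ i ∧ i ≤ m
    · have hset : (dp.set (m+1) ((dp.getD (m+1) []).union
          ((dp.getD m []).map (fun s => s + x)))).getD (i-1) [] = dp.getD (i-1) [] := by
        simp only [List.getD_eq_getElem?_getD, List.getElem?_set_ne (show m+1 ≠ i-1 by omega)]
      rw [if_pos hi, if_pos ⟨hi.1, by omega⟩, hset, List.getElem_set_ne (by omega)]
    · by_cases him : i = m + 1
      · subst him
        have hgd : (dp.getD (m+1) []) = dp[m+1] := List.getD_eq_getElem _ _ (by omega)
        rw [if_neg (by omega), if_pos ⟨by omega, le_refl _⟩,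
          List.getElem_set_self (by simp; omega), hgd]
        norm_num
      · rw [if_neg hi, if_neg (by omega), List.getElem_set_ne (by omega)]

lemma pvFoldInner_eq (K : Nat) (xs : List Int) (dp : List (PySem.Set Int))
    (h : dp.length = K + 1) :
    xs.foldl (fun dp x => (PySem.List.pyRange ((K : Int) - 1) (-1) (-1)).foldl (pvUpdB x) dp) dp
      = xs.foldl (fun dp x => pvStepB x K dp) dp := by
  induction xs generalizing dp with
  | nil => rfl
  | cons y ys ih =>
    rw [List.foldl_cons, List.foldl_cons, pvInner_spec y K dp (by omega)]
    exact ih _ (by rw [pvStepB_length]; exact h)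

/-- reference initial dp -/
def pvDp0 (k' : Nat) : List (PySem.Set Int) :=
  PySem.Set.ofList [0] :: List.replicate k' PySem.Set.empty

lemma pvFold_length (k' : Nat) (l : List Int) :
    (l.foldl (fun dp x => pvStepB x k' dp) (pvDp0 k')).length = k' + 1 := by
  induction l using List.reverseRecOn with
  | nil => simp [pvDp0]
  | append_singleton l x ih => rw [List.foldl_append, List.foldl_cons, List.foldl_nil,
      pvStepB_length, ih]

lemma pvFold_inv (k' : Nat) (l : List Int) (j : Nat) (hj : j < k' + 1) (m : Int) :
    m ∈ (l.foldl (fun dp x => pvStepB x k' dp) (pvDp0 k')).getD j []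
      ↔ pvSums j l m := by
  induction l using List.reverseRecOn generalizing j m with
  | nil =>
    simp only [List.foldl_nil]
    cases j with
    | zero =>
      have h0 : (PySem.Set.ofList [0] : List Int) = [0] := by decide
      show m ∈ (PySem.Set.ofList [0] : List Int) ↔ _
      rw [h0, pvSums_zero]
      simp
    | succ i =>
      show m ∈ (List.replicate k' (PySem.Set.empty : List Int)).getD i [] ↔ _
      rw [iff_false_intro (pvSums_succ_nil i m)]
      have : ∀ d : List Int, (List.replicate k' (PySem.Set.empty : List Int)).getD i d = d ∨
          (List.replicate k' (PySem.Set.empty : List Int)).getD i d = PySem.Set.empty := by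
        intro d
        by_cases hik : i < k'
        · right; rw [List.getD_eq_getElem _ _ (by simpa using hik)]; simp
        · left; rw [List.getD_eq_default _ _ (by simpa using hik)]
      rcases this [] with h | h <;> rw [h] <;> simp [PySem.Set.empty]
  | append_singleton l x ih =>
    rw [List.foldl_append, List.foldl_cons, List.foldl_nil]
    cases j with
    | zero =>
      rw [pvStepB_getD_zero, ih 0 (by omega), pvSums_zero, pvSums_zero]
    | succ i =>
      rw [pvStepB_getD_succ _ _ _ i (by rw [pvFold_length]; omega) (by omega),
        PySem.Set.mem_union, ih (i+1) hj,
        pvSums_perm (List.perm_append_singleton x l) (i+1) m, pvSums_succ_cons]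
      simp only [List.mem_map]
      constructor
      · rintro (h | ⟨s, hs, rfl⟩)
        · exact Or.inl h
        · exact Or.inr ⟨s, (ih i (by omega) s).mp hs, rfl⟩
      · rintro (h | ⟨s, hs, rfl⟩)
        · exact Or.inl h
        · exact Or.inr ⟨s, (ih i (by omega) s).mpr hs, rfl⟩

lemma pvMax?_congr (l l' : List Int) (h : ∀ m, m ∈ l ↔ m ∈ l') :
    PySem.List.max? l (fun x => x) = PySem.List.max? l' (fun x => x) := by
  cases hl : PySem.List.max? l (fun x => x) with
  | none =>
    rw [PySem.List.max?_eq_none_iff] at hl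
    subst hl
    symm; rw [PySem.List.max?_eq_none_iff, List.eq_nil_iff_forall_not_mem]
    intro m hm; exact (by simpa using (h m).mpr hm)
  | some a =>
    cases hl' : PySem.List.max? l' (fun x => x) with
    | none =>
      rw [PySem.List.max?_eq_none_iff] at hl'
      subst hl'
      exact absurd ((h a).mp (PySem.List.max?_mem hl)) (by simp)
    | some b =>
      have hab : a ≤ b := PySem.List.max?_isMax hl' a ((h a).mp (PySem.List.max?_mem hl))
      have hba : b ≤ a := PySem.List.max?_isMax hl b ((h b).mpr (PySem.List.max?_mem hl'))
      rw [le_antisymm hab hba]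

-- ===== VERDICT (by name: the statement is the Claim_ definition above) =====
theorem choose_best_sum_spec : Claim_equal_choose_best_sum := by
  intro t k ls _dom hpre
  unfold Spec_choose_best_sum
  unfold Pre_choose_best_sum at hpre
  have hK : ((k.toNat : Int)) = k := Int.toNat_of_nonneg hpre
  simp only [choose_best_sum, choose_best_sum_alt]
  rw [show k - 1 = ((k.toNat : Int)) - 1 from by omega]
  have hdp0 : ((PySem.Set.ofList [0] : PySem.Set Int) ::
      (PySem.List.pyRange 0 k 1).map (fun _ => (PySem.Set.empty : PySem.Set Int)))
      = pvDp0 k.toNat := by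
    rw [pvDp0]
    congr 1
    rw [PySem.List.pyRange_one, List.map_map]
    show (List.range (k - 0).toNat).map (fun _ => (PySem.Set.empty : PySem.Set Int)) = _
    rw [List.map_const', List.length_range]
    norm_num
  rw [hdp0, pvFoldInner_eq k.toNat _ _ (by simp [pvDp0])]
  set F : List Int := ls.filter (fun x => decide (x ≤ t)) with hF
  set sortedF : List Int := PySem.List.sorted F (fun x => x) false with hsF
  have hsperm : sortedF.Perm F := PySem.List.sorted_perm F (fun x => x) false
  have hsortlen : sortedF.length = F.length := PySem.List.length_sorted F (fun x => x) false
  set dp : List (PySem.Set Int) := F.foldl (fun dp x => pvStepB x k.toNat dp) (pvDp0 k.toNat) with hdp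
  have hdplen : dp.length = k.toNat + 1 := pvFold_length k.toNat F
  by_cases hlt : (F.length : Int) < k
  · rw [if_pos (by rw [hsortlen]; exact hlt), if_pos hlt]
  · rw [if_neg (by rw [hsortlen]; exact hlt), if_neg hlt]
    have hk2 : k.toNat < dp.length := by omega
    have hget : PySem.List.pyGet? dp k = some (dp.getD k.toNat []) := by
      have h1 : PySem.List.pyGet? dp k = dp[k.toNat]? := by
        conv_lhs => rw [← hK]
        exact PySem.List.pyGet?_natCast dp k.toNat
      rw [h1, List.getElem?_eq_getElem hk2, List.getD_eq_getElem _ _ hk2]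
    rw [hget]
    dsimp only
    set sums2 : List Int := ((pvCombsA k.toNat sortedF).map List.sum).filter
        (fun x => decide (x ≤ t)) with hs2
    set cands : List Int := (dp.getD k.toNat []).filter (fun s => decide (s ≤ t)) with hcands
    have hA : ∀ m, m ∈ sums2 ↔ pvSums k.toNat F m ∧ m ≤ t := by
      intro m
      rw [hs2, List.mem_filter, mem_map_sum_pvCombsA, pvSums_perm hsperm]
      simp
    have hB : ∀ m, m ∈ cands ↔ pvSums k.toNat F m ∧ m ≤ t := by
      intro m
      rw [hcands, List.mem_filter, hdp, pvFold_inv k.toNat F k.toNat (by omega)]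
      simp
    have hmem : ∀ m, m ∈ sums2 ↔ m ∈ cands := fun m => (hA m).trans (hB m).symm
    by_cases hnil : sums2.length = 0
    · have hcnil : cands.length = 0 := by
        rw [List.length_eq_zero_iff] at hnil ⊢
        rw [List.eq_nil_iff_forall_not_mem]
        intro m hm
        exact (List.eq_nil_iff_forall_not_mem.mp hnil) m ((hmem m).mpr hm)
      rw [if_pos hnil, if_pos hcnil]
    · have hcnil : ¬ cands.length = 0 := by
        rw [List.length_eq_zero_iff] at hnil ⊢
        intro hc
        apply hnil
        rw [List.eq_nil_iff_forall_not_mem]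
        intro m hm
        exact (List.eq_nil_iff_forall_not_mem.mp hc) m ((hmem m).mp hm)
      rw [if_neg hnil, if_neg hcnil]
      exact pvMax?_congr _ _ hmem
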